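-- pv_equiv track=rewrite | github.com/mailach/performance-learning-experiments | executor/parsing.py | _substitute_crossprod_params
-- ===== SOURCE A (Python) =====
-- import copy
-- import itertools
--
-- def _params_to_list(params):
--     param_list = []
--     param_names = []
--     for step in params:
--         for param_name, param in params[step].items():
--             param_list.append(param)
--             param_names.append((step, param_name))
--
--     return param_list, param_names
--
-- def _generate_param_substitutions(params, names):
--     substitutions = []
--     params = [prod for prod in itertools.product(*params)]
--     for param_tup in params:
--         conf = []
--         for i, name in enumerate(names):
--             conf.append((name[0], name[1], param_tup[i]))
--         substitutions.append(conf)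
--     return substitutions
--
-- def _expand_params(params):
--     params, names = _params_to_list(params)
--     subs = _generate_param_substitutions(params, names)
--     return subs
--
-- def _substitute_crossprod_params(parameters, experiment):
--     substitutions = _expand_params(parameters) if parameters else []
--     experiments = []
--     for exp_params in substitutions:
--         tmp_exp = copy.deepcopy(experiment)
--         for sub in exp_params:
--             tmp_exp[sub[0]]["params"][sub[1]] = sub[2]
--         experiments.append(tmp_exp)
--
--     return experiments
-- ===== SOURCE B (Python) =====
-- import copy
--
-- def _substitute_crossprod_params(parameters, experiment):
--     if not parameters:
--         return []
--     if any(not values for params in parameters.values() for values in params.values()):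
--         return []  # one parameter has no values: the cross product is empty
--     experiments = [copy.deepcopy(experiment)]
--     for step, params in parameters.items():
--         for name, values in params.items():
--             new_experiments = []
--             for exp in experiments:
--                 for value in values:
--                     nxt = copy.deepcopy(exp)
--                     nxt[step]["params"][name] = value
--                     new_experiments.append(nxt)
--             experiments = new_experiments
--     return experiments
-- ===== Notes on version B (the rewrite author's own statement) =====
-- stated objective: simpler
-- what changed: Replaced the params-to-parallel-lists / itertools.product / enumerate-zip pipeline with an incremental accumulator: start from one deep copy of the experiment and, for each (step, name, values), rebuild the experiment list as existing-partials x values, setting the parameter on a fresh copy.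
import Mathlib
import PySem

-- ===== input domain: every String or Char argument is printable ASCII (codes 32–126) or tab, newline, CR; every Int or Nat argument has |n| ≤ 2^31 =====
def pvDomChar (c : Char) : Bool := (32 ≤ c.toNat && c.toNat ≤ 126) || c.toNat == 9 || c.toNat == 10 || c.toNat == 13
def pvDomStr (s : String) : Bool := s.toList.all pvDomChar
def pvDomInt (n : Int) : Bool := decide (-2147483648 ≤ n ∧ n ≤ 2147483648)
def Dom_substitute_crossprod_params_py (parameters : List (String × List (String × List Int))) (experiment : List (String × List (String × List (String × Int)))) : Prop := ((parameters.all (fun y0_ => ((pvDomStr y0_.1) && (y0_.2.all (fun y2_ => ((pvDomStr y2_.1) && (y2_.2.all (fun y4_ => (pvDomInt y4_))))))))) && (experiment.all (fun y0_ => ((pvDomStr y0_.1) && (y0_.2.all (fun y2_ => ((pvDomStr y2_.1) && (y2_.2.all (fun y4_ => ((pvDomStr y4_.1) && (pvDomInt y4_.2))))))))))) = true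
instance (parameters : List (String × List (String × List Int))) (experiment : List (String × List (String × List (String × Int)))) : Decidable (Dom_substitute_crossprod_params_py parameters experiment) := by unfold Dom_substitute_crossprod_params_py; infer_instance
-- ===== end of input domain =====

-- B replaces the parallel-lists / itertools.product / enumerate-zip pipeline of A with an
-- incremental accumulator (partial experiments × values per parameter); objective: simpler, same cost.

-- ===== PORT A =====
-- shared dict-mutation helpers: Python's `m[k] = v` on a dict (overwrite first match in place,
-- else append) and in-place modification of the value at an existing key (no-op when the key is
-- absent — the absent case is a Python KeyError and is excluded by Pre_).
def pvSetKey {α : Type} (m : List (String × α)) (k : String) (v : α) : List (String × α) :=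
  match m with
  | [] => [(k, v)]
  | (k', v') :: rest => if k' = k then (k', v) :: rest else (k', v') :: pvSetKey rest k v

def pvModKey {α : Type} (m : List (String × α)) (k : String) (f : α → α) : List (String × α) :=
  match m with
  | [] => []
  | (k', v') :: rest => if k' = k then (k', f v') :: rest else (k', v') :: pvModKey rest k f

-- tmp_exp[s]["params"][n] = v
def pvAssign (e : List (String × List (String × List (String × Int)))) (s n : String) (v : Int) :
    List (String × List (String × List (String × Int))) :=
  pvModKey e s (fun d => pvModKey d "params" (fun m => pvSetKey m n v))

-- itertools.product(*params), ported by hand (exact: same order, product of zero lists is [[]])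
def pvProduct : List (List Int) → List (List Int)
  | [] => [[]]
  | vs :: rest => vs.flatMap (fun v => (pvProduct rest).map (fun t => v :: t))

-- _params_to_list (the dict iteration `for step in params: … params[step].items()` is the
-- items() iteration of the outer dict — exact for dicts, whose keys are unique)
def pvParamsToList (parameters : List (String × List (String × List Int))) :
    List (List Int) × List (String × String) :=
  parameters.foldl
    (fun acc p => p.2.foldl (fun acc2 q => (acc2.1 ++ [q.2], acc2.2 ++ [(p.1, q.1)])) acc)
    ([], [])

-- _generate_param_substitutions
def pvGenSubs (params : List (List Int)) (names : List (String × String)) :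
    List (List (String × String × Int)) :=
  (pvProduct params).map
    (fun tup => (PySem.List.enumerate names 0).map
      (fun p => (p.2.1, p.2.2, PySem.List.pyGetD tup p.1 0)))

-- _expand_params
def pvExpand (parameters : List (String × List (String × List Int))) :
    List (List (String × String × Int)) :=
  pvGenSubs (pvParamsToList parameters).1 (pvParamsToList parameters).2

def substitute_crossprod_params_py (parameters : List (String × List (String × List Int))) (experiment : List (String × List (String × List (String × Int)))) : List (List (String × List (String × List (String × Int)))) :=
  let substitutions := if parameters.isEmpty then [] else pvExpand parameters
  substitutions.foldl
    (fun acc conf => acc ++ [conf.foldl (fun e t => pvAssign e t.1 t.2.1 t.2.2) experiment]) []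

-- ===== PORT B =====
def substitute_crossprod_params_py_alt (parameters : List (String × List (String × List Int))) (experiment : List (String × List (String × List (String × Int)))) : List (List (String × List (String × List (String × Int)))) :=
  if parameters.isEmpty then []
  else if parameters.any (fun p => p.2.any (fun q => q.2.isEmpty)) then []
  else
    parameters.foldl
      (fun exps p =>
        p.2.foldl
          (fun exps2 q => exps2.flatMap (fun e => q.2.map (fun v => pvAssign e p.1 q.1 v)))
          exps)
      [experiment]

-- ===== PRECONDITION & SPEC =====
-- Pre_ excludes exactly the KeyError inputs: when at least one full substitution exists, every
-- step named in parameters (with at least one parameter) must be present in the experiment and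
-- its entry must contain the key "params"; otherwise both Pythons raise KeyError.
def Pre_substitute_crossprod_params_py (parameters : List (String × List (String × List Int))) (experiment : List (String × List (String × List (String × Int)))) : Prop :=
  (parameters ≠ [] ∧ ∀ p ∈ parameters, ∀ q ∈ p.2, q.2 ≠ []) →
    ∀ p ∈ parameters, p.2 ≠ [] →
      ((experiment.lookup p.1).bind (fun d => d.lookup "params")).isSome = true
instance (parameters : List (String × List (String × List Int))) (experiment : List (String × List (String × List (String × Int)))) : Decidable (Pre_substitute_crossprod_params_py parameters experiment) := by unfold Pre_substitute_crossprod_params_py; infer_instance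

def pvWitness_substitute_crossprod_params_py : (List (String × List (String × List Int))) × (List (String × List (String × List (String × Int)))) :=
  ([("s", [("x", [1, 2])])], [("s", [("params", [("x", 0)])])])

def Spec_substitute_crossprod_params_py (parameters : List (String × List (String × List Int))) (experiment : List (String × List (String × List (String × Int)))) (out : List (List (String × List (String × List (String × Int))))) : Prop := out = substitute_crossprod_params_py_alt parameters experiment
instance (parameters : List (String × List (String × List Int))) (experiment : List (String × List (String × List (String × Int)))) (out : List (List (String × List (String × List (String × Int))))) : Decidable (Spec_substitute_crossprod_params_py parameters experiment out) := by
  unfold Spec_substitute_crossprod_params_py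
  haveI : DecidableEq (List (String × Int)) := inferInstance
  haveI : DecidableEq (List (String × List (String × Int))) := inferInstance
  haveI : DecidableEq (List (String × List (String × List (String × Int)))) := inferInstance
  infer_instance

-- ===== CLAIM (what is proved, stated in full; the proofs are below) =====
def Claim_equal_substitute_crossprod_params_py : Prop := ∀ (parameters : List (String × List (String × List Int))) (experiment : List (String × List (String × List (String × Int)))), Dom_substitute_crossprod_params_py parameters experiment → Pre_substitute_crossprod_params_py parameters experiment → Spec_substitute_crossprod_params_py parameters experiment (substitute_crossprod_params_py parameters experiment)

-- ===== LEMMAS AND PROOFS =====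

-- the flat list of (step, name, values) triples both programs enumerate, in the same order
def pvPairs (parameters : List (String × List (String × List Int))) :
    List (String × String × List Int) :=
  parameters.flatMap (fun p => p.2.map (fun q => (p.1, q.1, q.2)))

-- recursive specification of the cross-product expansion
def pvG : List (String × String × List Int) → List (String × List (String × List (String × Int))) →
    List (List (String × List (String × List (String × Int))))
  | [], e => [e]
  | (s, n, vs) :: rest, e => vs.flatMap (fun v => pvG rest (pvAssign e s n v))

theorem pvParamsToList_inner (s : String) (d : List (String × List Int))
    (acc : List (List Int) × List (String × String)) :
    d.foldl (fun acc2 q => (acc2.1 ++ [q.2], acc2.2 ++ [(s, q.1)])) acc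
      = (acc.1 ++ d.map (·.2), acc.2 ++ d.map (fun q => (s, q.1))) := by
  induction d generalizing acc with
  | nil => simp
  | cons q rest ih => simp [List.foldl_cons, ih]

theorem pvParamsToList_eq_pairs (parameters : List (String × List (String × List Int)))
    (acc : List (List Int) × List (String × String)) :
    parameters.foldl
      (fun acc p => p.2.foldl (fun acc2 q => (acc2.1 ++ [q.2], acc2.2 ++ [(p.1, q.1)])) acc) acc
      = (acc.1 ++ (pvPairs parameters).map (·.2.2),
         acc.2 ++ (pvPairs parameters).map (fun t => (t.1, t.2.1))) := by
  induction parameters generalizing acc with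
  | nil => simp [pvPairs]
  | cons p rest ih =>
      rw [List.foldl_cons, pvParamsToList_inner, ih]
      simp [pvPairs, Function.comp_def]

theorem pvProduct_length {ls : List (List Int)} {tup : List Int} (h : tup ∈ pvProduct ls) :
    tup.length = ls.length := by
  induction ls generalizing tup with
  | nil => simp [pvProduct] at h; simp [h]
  | cons vs rest ih =>
      simp only [pvProduct, List.mem_flatMap, List.mem_map] at h
      obtain ⟨v, _, t, ht, rfl⟩ := h
      simp [ih ht]

theorem pvConf_eq_zipWith (names : List (String × String)) (tup : List Int) (k : Nat)
    (h : k + names.length ≤ tup.length) :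
    (PySem.List.enumerate names (k : Int)).map
        (fun p => (p.2.1, p.2.2, PySem.List.pyGetD tup p.1 0))
      = List.zipWith (fun nm v => (nm.1, nm.2, v)) names (tup.drop k) := by
  induction names generalizing k with
  | nil => simp [PySem.List.enumerate_nil]
  | cons nm rest ih =>
      have hk : k < tup.length := by simp at h; omega
      rw [List.drop_eq_getElem_cons hk]
      simp only [PySem.List.enumerate_cons, List.map_cons, List.zipWith_cons_cons,
        PySem.List.pyGetD_natCast]
      have hcast : ((k : Int) + 1) = (((k + 1 : Nat)) : Int) := by push_cast; ring
      rw [List.getD_eq_getElem tup 0 hk, hcast, ih (k + 1) (by simp at h ⊢; omega)]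

-- corollary for start index 0
theorem pvConf0 (names : List (String × String)) (tup : List Int)
    (h : names.length ≤ tup.length) :
    (PySem.List.enumerate names 0).map
        (fun p => (p.2.1, p.2.2, PySem.List.pyGetD tup p.1 0))
      = List.zipWith (fun nm v => (nm.1, nm.2, v)) names tup := by
  have := pvConf_eq_zipWith names tup 0 (by omega)
  simpa using this

theorem pvL2 (pairs : List (String × String × List Int))
    (e : List (String × List (String × List (String × Int)))) :
    (pvProduct (pairs.map (·.2.2))).map
        (fun tup => (List.zipWith (fun t v => (t.1, t.2.1, v)) pairs tup).foldl
          (fun e t => pvAssign e t.1 t.2.1 t.2.2) e)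
      = pvG pairs e := by
  induction pairs generalizing e with
  | nil => simp [pvProduct, pvG]
  | cons t rest ih =>
      obtain ⟨s, n, vs⟩ := t
      simp only [List.map_cons, pvProduct, List.map_flatMap, List.map_map]
      show vs.flatMap _ = vs.flatMap _
      congr 1
      funext v
      rw [← ih (pvAssign e s n v)]
      rfl

theorem pvL1 (pairs : List (String × String × List Int))
    (es : List (List (String × List (String × List (String × Int))))) :
    pairs.foldl
        (fun exps t => exps.flatMap (fun e => t.2.2.map (fun v => pvAssign e t.1 t.2.1 v))) es
      = es.flatMap (pvG pairs) := by
  induction pairs generalizing es with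
  | nil => simp [pvG]
  | cons t rest ih =>
      obtain ⟨s, n, vs⟩ := t
      rw [List.foldl_cons, ih, List.flatMap_assoc]
      congr 1
      funext e
      simp [pvG, List.flatMap_map]

theorem pvG_of_empty {pairs : List (String × String × List Int)}
    (h : ∃ t ∈ pairs, t.2.2 = [])
    (e : List (String × List (String × List (String × Int)))) : pvG pairs e = [] := by
  induction pairs generalizing e with
  | nil => simp at h
  | cons t rest ih =>
      obtain ⟨s, n, vs⟩ := t
      rcases h with ⟨t', ht', hemp⟩
      rcases List.mem_cons.mp ht' with rfl | hmem
      · simp only at hemp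
        simp [pvG, hemp]
      · exact List.flatMap_eq_nil_iff.mpr (fun v _ => ih ⟨t', hmem, hemp⟩ _)

-- B's nested foldl over parameters is the single foldl over pvPairs
theorem pvB_foldl_eq (parameters : List (String × List (String × List Int)))
    (es : List (List (String × List (String × List (String × Int))))) :
    parameters.foldl
        (fun exps p => p.2.foldl
          (fun exps2 q => exps2.flatMap (fun e => q.2.map (fun v => pvAssign e p.1 q.1 v))) exps)
        es
      = (pvPairs parameters).foldl
          (fun exps t => exps.flatMap (fun e => t.2.2.map (fun v => pvAssign e t.1 t.2.1 v))) es := by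
  induction parameters generalizing es with
  | nil => simp [pvPairs]
  | cons p rest ih =>
      simp only [List.foldl_cons, pvPairs, List.flatMap_cons, List.foldl_append, ih,
        List.foldl_map]

-- A's result equals pvG over the pairs (for any nonempty parameters)
theorem pvA_eq_G (parameters : List (String × List (String × List Int)))
    (experiment : List (String × List (String × List (String × Int))))
    (hne : parameters.isEmpty = false) :
    substitute_crossprod_params_py parameters experiment = pvG (pvPairs parameters) experiment := by
  unfold substitute_crossprod_params_py
  rw [hne]
  simp only [Bool.false_eq_true, if_false, PySem.List.foldl_append_singleton_eq_map]
  unfold pvExpand pvGenSubs pvParamsToList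
  rw [pvParamsToList_eq_pairs]
  simp only [List.nil_append, List.map_map]
  rw [← pvL2 (pvPairs parameters) experiment]
  refine List.map_congr_left (fun tup htup => ?_)
  have hlen : tup.length = ((pvPairs parameters).map (·.2.2)).length := pvProduct_length htup
  show List.foldl _ experiment _ = List.foldl _ experiment _
  congr 1
  beta_reduce
  rw [pvConf0 _ tup (by simp at hlen ⊢; omega), List.zipWith_map_left]

-- ===== VERDICT (by name: the statement is the Claim_ definition above) =====
theorem substitute_crossprod_params_py_spec : Claim_equal_substitute_crossprod_params_py := by
  intro parameters experiment _ _
  unfold Spec_substitute_crossprod_params_py substitute_crossprod_params_py_alt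
  by_cases hemp : parameters.isEmpty
  · rw [if_pos hemp]
    unfold substitute_crossprod_params_py
    rw [if_pos hemp]
    simp
  · rw [if_neg hemp, pvA_eq_G parameters experiment (by simpa using hemp)]
    by_cases hany : parameters.any (fun p => p.2.any (fun q => q.2.isEmpty)) = true
    · rw [if_pos hany]
      refine pvG_of_empty ?_ experiment
      simp only [List.any_eq_true] at hany
      obtain ⟨p, hp, q, hq, hqe⟩ := hany
      exact ⟨(p.1, q.1, q.2), by
        simp only [pvPairs, List.mem_flatMap]
        exact ⟨p, hp, List.mem_map.mpr ⟨q, hq, rfl⟩⟩, by simpa using hqe⟩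
    · rw [if_neg hany, pvB_foldl_eq, pvL1]
      simp
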